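-- pv_equiv track=rewrite | github.com/frans203/compilers_college | atv04/analisador.py | calcular_linha_coluna
-- ===== SOURCE A (Python) =====
-- from typing import List
--
-- def calcular_linha_coluna(linhas: List[str], posicao: int):
--     contador = 0
--     for i, linha in enumerate(linhas):
--         if contador + len(linha) + 1 > posicao:
--             coluna = posicao - contador + 1
--             return i + 1, coluna
--         contador += len(linha) + 1 #+1 por conta do \n
--     return -1, -1
-- ===== SOURCE B (Python) =====
-- from typing import List
-- from bisect import bisect_right
-- from itertools import accumulate
--
-- def calcular_linha_coluna(linhas: List[str], posicao: int):
--     ends = list(accumulate(len(l) + 1 for l in linhas))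
--     i = bisect_right(ends, posicao)
--     if i < len(linhas):
--         start = ends[i] - (len(linhas[i]) + 1)
--         return i + 1, posicao - start + 1
--     return -1, -1
-- ===== Notes on version B (the rewrite author's own statement) =====
-- stated objective: alternative
-- what changed: Replaces the incremental linear scan with building a cumulative end-offset table (itertools.accumulate) and locating the line by binary search (bisect_right).
import Mathlib
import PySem

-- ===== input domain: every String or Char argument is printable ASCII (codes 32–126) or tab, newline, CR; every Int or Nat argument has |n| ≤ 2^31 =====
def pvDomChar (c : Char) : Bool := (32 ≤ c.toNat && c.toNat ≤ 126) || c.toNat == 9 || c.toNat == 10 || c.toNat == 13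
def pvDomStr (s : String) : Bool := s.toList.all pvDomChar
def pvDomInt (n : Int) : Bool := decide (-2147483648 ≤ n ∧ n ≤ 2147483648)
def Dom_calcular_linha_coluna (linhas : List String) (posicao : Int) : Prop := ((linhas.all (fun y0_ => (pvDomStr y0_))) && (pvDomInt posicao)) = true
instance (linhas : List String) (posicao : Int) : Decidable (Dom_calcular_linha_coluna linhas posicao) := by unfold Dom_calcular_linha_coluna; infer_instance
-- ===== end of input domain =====

-- B replaces A's incremental linear scan by a cumulative end-offset table plus binary search
-- (bisect_right); same results on every input, a different algorithm of similar cost.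

-- ===== PORT A =====
-- A's for-loop with early return, as structural recursion over (contador, i).
def calcAux : List String → Int → Int → Int → Int × Int
  | [], _, _, _ => (-1, -1)
  | linha :: rest, posicao, contador, i =>
    if contador + PySem.Str.len linha + 1 > posicao then
      (i + 1, posicao - contador + 1)
    else
      calcAux rest posicao (contador + PySem.Str.len linha + 1) (i + 1)

def calcular_linha_coluna (linhas : List String) (posicao : Int) : Int × Int :=
  calcAux linhas posicao 0 0

-- ===== PORT B =====
-- itertools.accumulate over the per-line increments len(l)+1, with running start `acc`.
def pvAccumulate : List Int → Int → List Int
  | [], _ => []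
  | x :: xs, acc => (acc + x) :: pvAccumulate xs (acc + x)

def calcular_linha_coluna_alt (linhas : List String) (posicao : Int) : Int × Int :=
  let ends := pvAccumulate (linhas.map (fun l => PySem.Str.len l + 1)) 0
  let i := PySem.List.bisectRight ends posicao
  if i < linhas.length then
    ((i : Int) + 1,
      posicao - (ends.getD i 0 - (PySem.Str.len (linhas.getD i "") + 1)) + 1)
  else (-1, -1)

-- ===== PRECONDITION & SPEC =====
def Spec_calcular_linha_coluna (linhas : List String) (posicao : Int) (out : Int × Int) : Prop := out = calcular_linha_coluna_alt linhas posicao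
instance (linhas : List String) (posicao : Int) (out : Int × Int) : Decidable (Spec_calcular_linha_coluna linhas posicao out) := by unfold Spec_calcular_linha_coluna; infer_instance

-- ===== CLAIM (what is proved, stated in full; the proofs are below) =====
def Claim_equal_calcular_linha_coluna : Prop := ∀ (linhas : List String) (posicao : Int), Dom_calcular_linha_coluna linhas posicao → Spec_calcular_linha_coluna linhas posicao (calcular_linha_coluna linhas posicao)

-- ===== LEMMAS AND PROOFS =====

-- every entry of the accumulate table is ≥ the start offset (increments nonnegative)
theorem pvAccumulate_ge (lens : List Int) (c : Int) (h : ∀ x ∈ lens, 0 ≤ x) :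
    ∀ e ∈ pvAccumulate lens c, c ≤ e := by
  induction lens generalizing c with
  | nil => simp [pvAccumulate]
  | cons x xs ih =>
    intro e he
    have hx : 0 ≤ x := h x (by simp)
    simp only [pvAccumulate, List.mem_cons] at he
    rcases he with rfl | he
    · omega
    · have := ih (c + x) (fun y hy => h y (by simp [hy])) e he
      omega

theorem pvAccumulate_pairwise (lens : List Int) (c : Int) (h : ∀ x ∈ lens, 0 ≤ x) :
    (pvAccumulate lens c).Pairwise (· ≤ ·) := by
  induction lens generalizing c with
  | nil => simp [pvAccumulate]
  | cons x xs ih =>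
    simp only [pvAccumulate, List.pairwise_cons]
    refine ⟨fun e he => ?_, ih (c + x) (fun y hy => h y (by simp [hy]))⟩
    exact pvAccumulate_ge xs (c + x) (fun y hy => h y (by simp [hy])) e he

-- characterisation of A's loop: first index whose cumulative end offset exceeds posicao
theorem calcAux_eq (linhas : List String) (pos c i : Int) :
    calcAux linhas pos c i =
      (let ends := pvAccumulate (linhas.map (fun l => PySem.Str.len l + 1)) c
       let k := ends.findIdx (fun e => decide (pos < e))
       if k < linhas.length then
         (i + (k : Int) + 1,
           pos - (ends.getD k 0 - (PySem.Str.len (linhas.getD k "") + 1)) + 1)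
       else (-1, -1)) := by
  induction linhas generalizing c i with
  | nil => simp [calcAux, pvAccumulate]
  | cons l rest ih =>
    simp only [List.map_cons, pvAccumulate]
    by_cases hlt : pos < c + (PySem.Str.len l + 1)
    · have hA : c + PySem.Str.len l + 1 > pos := by omega
      simp only [calcAux, if_pos hA, List.findIdx_cons, hlt, decide_true, cond_true]
      simp only [List.length_cons]
      rw [if_pos (Nat.succ_pos _)]
      simp only [List.getD, List.getElem?_cons_zero, Option.getD_some, Nat.cast_zero,
        Prod.mk.injEq]
      constructor <;> ring
    · have hA : ¬ (c + PySem.Str.len l + 1 > pos) := by omega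
      simp only [calcAux, if_neg hA]
      have hassoc : c + PySem.Str.len l + 1 = c + (PySem.Str.len l + 1) := by ring
      rw [hassoc, ih (c + (PySem.Str.len l + 1)) (i + 1)]
      simp only [List.findIdx_cons, hlt, decide_false, cond_false]
      have hcond : (List.findIdx (fun e => decide (pos < e))
            (pvAccumulate (rest.map (fun l => PySem.Str.len l + 1)) (c + (PySem.Str.len l + 1)))) + 1
            < (l :: rest).length ↔
          (List.findIdx (fun e => decide (pos < e))
            (pvAccumulate (rest.map (fun l => PySem.Str.len l + 1)) (c + (PySem.Str.len l + 1)))) < rest.length := by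
        simp only [List.length_cons]; omega
      by_cases hk : (List.findIdx (fun e => decide (pos < e))
          (pvAccumulate (rest.map (fun l => PySem.Str.len l + 1)) (c + (PySem.Str.len l + 1)))) < rest.length
      · rw [if_pos hk, if_pos (hcond.mpr hk)]
        simp only [List.getD, List.getElem?_cons_succ, Nat.cast_add, Nat.cast_one,
          Prod.mk.injEq]
        constructor
        · ring
        · trivial
      · rw [if_neg hk, if_neg (fun h => hk (hcond.mp h))]

-- bisect_right on a ≤-sorted list is the first index whose entry exceeds x
theorem bisectRight_eq_findIdx (xs : List Int) (x : Int) (hs : xs.Pairwise (· ≤ ·)) :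
    PySem.List.bisectRight xs x = xs.findIdx (fun e => decide (x < e)) := by
  obtain ⟨hle, hbelow, habove⟩ := PySem.List.bisectRight_spec xs x hs
  have hkle : xs.findIdx (fun e => decide (x < e)) ≤ xs.length := List.findIdx_le_length
  rcases Nat.lt_trichotomy (PySem.List.bisectRight xs x)
      (xs.findIdx (fun e => decide (x < e))) with h | h | h
  · -- bisectRight < findIdx : entry at bisectRight already exceeds x, contradicting minimality
    exfalso
    have hrlen : PySem.List.bisectRight xs x < xs.length := lt_of_lt_of_le h hkle
    have hx : x < xs[PySem.List.bisectRight xs x] := habove _ hrlen (le_refl _)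
    have hnp := List.not_of_lt_findIdx (p := fun e => decide (x < e)) (xs := xs) h
    simp only [decide_eq_false_iff_not] at hnp
    exact hnp hx
  · exact h
  · -- findIdx < bisectRight : entry at findIdx exceeds x, contradicting the spec below bisectRight
    exfalso
    have hklen : xs.findIdx (fun e => decide (x < e)) < xs.length := lt_of_lt_of_le h hle
    have hp := List.findIdx_getElem (p := fun e => decide (x < e)) (w := hklen)
    simp only [decide_eq_true_eq] at hp
    exact absurd (hbelow _ hklen h) (not_le.mpr hp)

-- ===== VERDICT (by name: the statement is the Claim_ definition above) =====
theorem calcular_linha_coluna_spec : Claim_equal_calcular_linha_coluna := by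
  intro linhas posicao _
  unfold Spec_calcular_linha_coluna
  simp only [calcular_linha_coluna, calcular_linha_coluna_alt, calcAux_eq]
  have hnn : ∀ x ∈ linhas.map (fun l => PySem.Str.len l + 1), 0 ≤ x := by
    intro x hx
    simp only [List.mem_map] at hx
    obtain ⟨l, _, rfl⟩ := hx
    have : (0 : Int) ≤ PySem.Str.len l := by simp [PySem.Str.len]
    omega
  rw [bisectRight_eq_findIdx _ posicao (pvAccumulate_pairwise _ 0 hnn)]
  simp only [zero_add]
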